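-- pv_equiv track=rewrite | github.com/rubrikinc/nbdb2 | python/nbdb/readapi/GraphiteParser.py | convert_set_patterns
-- ===== SOURCE A (Python) =====
-- def convert_set_patterns(target: str) -> str:
--     """
--     Convert patterns like {a,b,c} in the metric query to {a;b;c}
--
--     We use commas in our parsing logic to demarcate argument boundaries.
--     The set pattern {a,b,c} confuses our logic into thinking they are
--     different arguments when they are a part of the same metric in reality.
--
--     :param target:
--     :return: Converted string
--     """
--     # Generate list of tuples where each tuple stores the parenthesis start
--     # and end indices
--     set_indices = list()
--     last_char = None
--     last_char_idx = None
--     for idx, char in enumerate(target):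
--         if char not in ['{', '}']:
--             # Only interested in set patterns
--             continue
--
--         if char == '{':
--             if last_char == '{':
--                 raise ValueError('Nested {} patterns not supported')
--
--         elif char == '}':
--             if last_char == '}':
--                 raise ValueError('Nested {} patterns not supported')
--
--             # Last character has to be {
--             if last_char is None:
--                 raise ValueError('Unterminated {} pattern seen')
--
--             set_indices += [(last_char_idx, idx)]
--
--         last_char = char
--         last_char_idx = idx
--
--     if last_char == '{':
--         raise ValueError('Unterminated {} pattern seen')
--
--     for set_start_idx, set_end_idx in set_indices:
--         # Replace the commas that lie within the set index boundaries, but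
--         # make sure the other parts of the target string are not touched
--         target = (target[:set_start_idx] +
--                   target[set_start_idx:set_end_idx].replace(",", ";") +
--                   target[set_end_idx:])
--
--     return target
-- ===== SOURCE B (Python) =====
-- def convert_set_patterns(target: str) -> str:
--     """
--     Convert patterns like {a,b,c} in the metric query to {a;b;c}.
--
--     Single left-to-right pass: track whether we are inside a {...} set
--     pattern and emit ';' for each ',' seen while inside; malformed brace
--     sequences raise ValueError as in the original.
--     """
--     out = []
--     in_set = False
--     for char in target:
--         if char == '{':
--             if in_set:
--                 raise ValueError('Nested {} patterns not supported')
--             in_set = True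
--             out.append(char)
--         elif char == '}':
--             if not in_set:
--                 raise ValueError('Unterminated {} pattern seen')
--             in_set = False
--             out.append(char)
--         elif char == ',' and in_set:
--             out.append(';')
--         else:
--             out.append(char)
--     if in_set:
--         raise ValueError('Unterminated {} pattern seen')
--     return ''.join(out)
-- ===== Notes on version B (the rewrite author's own statement) =====
-- stated objective: alternative
-- what changed: A scans to collect brace-pair index ranges and then rebuilds the whole string once per {..} pair via slicing and replace; B is a single left-to-right pass with an in-set flag, emitting ';' for commas seen inside braces.
import Mathlib
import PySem

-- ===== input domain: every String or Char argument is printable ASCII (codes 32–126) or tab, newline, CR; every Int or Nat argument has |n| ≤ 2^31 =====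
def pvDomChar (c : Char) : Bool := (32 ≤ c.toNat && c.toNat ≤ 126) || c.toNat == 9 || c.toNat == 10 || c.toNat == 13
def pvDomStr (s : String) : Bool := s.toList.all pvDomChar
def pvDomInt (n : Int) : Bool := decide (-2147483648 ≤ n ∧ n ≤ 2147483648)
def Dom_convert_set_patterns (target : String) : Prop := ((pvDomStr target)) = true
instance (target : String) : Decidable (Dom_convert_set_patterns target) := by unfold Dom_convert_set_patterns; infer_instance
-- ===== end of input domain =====

-- B replaces A's collect-brace-ranges-then-rebuild-per-pair passes with a single
-- left-to-right scan tracking an in-set flag (alternative algorithm, same cost).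


-- ===== PORT A =====
-- first loop of A: collect the (last_char_idx, idx) index pairs of the {...} patterns,
-- tracking the last brace character seen and its index.  Python's last_char_idx starts
-- as None but is only ever read after last_char was set; we carry it as an Int
-- initialised to 0.
def cspScan : List (Int × Char) → List (Int × Int) → Option Char → Int →
    Except String (List (Int × Int) × Option Char)
  | [], pairs, lastChar, _ => .ok (pairs, lastChar)
  | (idx, c) :: rest, pairs, lastChar, lastIdx =>
    if ¬ (c = '{' ∨ c = '}') then cspScan rest pairs lastChar lastIdx
    else if c = '{' then
      if lastChar = some '{' then .error "Nested {} patterns not supported"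
      else cspScan rest pairs (some '{') idx
    else
      if lastChar = some '}' then .error "Nested {} patterns not supported"
      else if lastChar = none then .error "Unterminated {} pattern seen"
      else cspScan rest (pairs ++ [(lastIdx, idx)]) (some '}') idx

-- one step of A's second loop: target = target[:s] + target[s:e].replace(',', ';') + target[e:]
def cspApply (cs : List Char) (p : Int × Int) : List Char :=
  PySem.Chars.slice cs none (some p.1) ++
  PySem.Chars.replace (PySem.Chars.slice cs (some p.1) (some p.2)) [','] [';'] ++
  PySem.Chars.slice cs (some p.2) none

def convert_set_patterns (target : String) : String :=
  match cspScan (PySem.List.enumerate target.toList) [] none 0 with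
  | .error _ => ""   -- Python raises ValueError here (excluded by Pre_)
  | .ok (pairs, lastChar) =>
    if lastChar = some '{' then ""   -- Python raises ValueError here (excluded by Pre_)
    else String.ofList (pairs.foldl cspApply target.toList)

-- ===== PORT B =====
-- one step of B's single pass: state = (out so far, inside-a-set flag), error = raise
def cspStep : Except String (List Char × Bool) → Char → Except String (List Char × Bool)
  | .error e, _ => .error e
  | .ok (out, inSet), c =>
    if c = '{' then
      if inSet then .error "Nested {} patterns not supported"
      else .ok (out ++ [c], true)
    else if c = '}' then
      if inSet then .ok (out ++ [c], false)
      else .error "Unterminated {} pattern seen"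
    else if c = ',' ∧ inSet then .ok (out ++ [';'], inSet)
    else .ok (out ++ [c], inSet)

def convert_set_patterns_alt (target : String) : String :=
  match target.toList.foldl cspStep (.ok ([], false)) with
  | .error _ => ""   -- Python raises ValueError here (excluded by Pre_)
  | .ok (out, inSet) =>
    if inSet then ""   -- Python raises ValueError here (excluded by Pre_)
    else String.ofList out

-- ===== PRECONDITION & SPEC =====
def cspIsBrace (c : Char) : Bool := c == '{' || c == '}'

-- the braces of the string, in order, form zero or more adjacent '{' '}' pairs
def cspBalanced : List Char → Bool
  | [] => true
  | [_] => false
  | a :: b :: rest => a == '{' && b == '}' && cspBalanced rest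

-- Pre_ excludes exactly the inputs on which Python A raises ValueError
-- (nested or unterminated {} patterns); B raises there too.
def Pre_convert_set_patterns (target : String) : Prop :=
  cspBalanced (target.toList.filter cspIsBrace) = true
instance (target : String) : Decidable (Pre_convert_set_patterns target) := by
  unfold Pre_convert_set_patterns; infer_instance

def pvWitness_convert_set_patterns : String := "a.{b,c,d}.e"

def Spec_convert_set_patterns (target : String) (out : String) : Prop :=
  out = convert_set_patterns_alt target
instance (target : String) (out : String) : Decidable (Spec_convert_set_patterns target out) := by
  unfold Spec_convert_set_patterns; infer_instance

-- ===== CLAIM (what is proved, stated in full; the proofs are below) =====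
def Claim_equal_convert_set_patterns : Prop :=
  ∀ (target : String), Dom_convert_set_patterns target →
    Pre_convert_set_patterns target →
    Spec_convert_set_patterns target (convert_set_patterns target)

-- ===== LEMMAS AND PROOFS =====

-- comma-to-semicolon on one character
def cspf (c : Char) : Char := if c = ',' then ';' else c

-- common specification: the one-pass transformation, errors ignored
def bspec : List Char → Bool → List Char
  | [], _ => []
  | c :: rest, inSet =>
    if c = '{' then '{' :: bspec rest true
    else if c = '}' then '}' :: bspec rest false
    else (if c = ',' ∧ inSet then ';' else c) :: bspec rest inSet

-- "the run starting in state b raises no error and ends outside a set"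
def cspOk : List Char → Bool → Bool
  | [], b => !b
  | c :: rest, b =>
    if c = '{' then !b && cspOk rest true
    else if c = '}' then b && cspOk rest false
    else cspOk rest b

-- cspBalanced with one '}' still owed
def cspBalancedT : List Char → Bool
  | [] => false
  | c :: rest => c == '}' && cspBalanced rest

theorem cspScan_cons (idx : Int) (c : Char) (rest : List (Int × Char))
    (pairs : List (Int × Int)) (lc : Option Char) (li : Int) :
    cspScan ((idx, c) :: rest) pairs lc li =
      (if ¬ (c = '{' ∨ c = '}') then cspScan rest pairs lc li
       else if c = '{' then
         if lc = some '{' then .error "Nested {} patterns not supported"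
         else cspScan rest pairs (some '{') idx
       else
         if lc = some '}' then .error "Nested {} patterns not supported"
         else if lc = none then .error "Unterminated {} pattern seen"
         else cspScan rest (pairs ++ [(li, idx)]) (some '}') idx) := rfl

theorem cspBalanced_cons_lbrace (l : List Char) :
    cspBalanced ('{' :: l) = cspBalancedT l := by
  cases l <;> simp [cspBalanced, cspBalancedT]

theorem cspBalanced_cons_rbrace (l : List Char) :
    cspBalanced ('}' :: l) = false := by
  cases l <;> simp [cspBalanced]

theorem cspOk_eq_balanced (cs : List Char) (b : Bool) :
    cspOk cs b = (if b then cspBalancedT (cs.filter cspIsBrace)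
                  else cspBalanced (cs.filter cspIsBrace)) := by
  induction cs generalizing b with
  | nil => cases b <;> simp [cspOk, cspBalanced, cspBalancedT]
  | cons c rest ih =>
    by_cases h1 : c = '{'
    · subst h1
      cases b <;>
        simp [cspOk, cspIsBrace, ih, cspBalanced_cons_lbrace, cspBalancedT]
    · by_cases h2 : c = '}'
      · subst h2
        cases b <;>
          simp [cspOk, cspIsBrace, ih, cspBalancedT, cspBalanced_cons_rbrace]
      · have hbr : cspIsBrace c = false := by simp [cspIsBrace, h1, h2]
        cases b <;> simp [cspOk, h1, h2, hbr, ih]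

-- B side: the fold runs to completion and produces bspec
theorem bfold (cs : List Char) (out : List Char) (b : Bool) (h : cspOk cs b = true) :
    cs.foldl cspStep (.ok (out, b)) = .ok (out ++ bspec cs b, false) := by
  induction cs generalizing out b with
  | nil =>
    cases b with
    | true => simp [cspOk] at h
    | false => simp [bspec]
  | cons c rest ih =>
    by_cases h1 : c = '{'
    · subst h1
      have hb : b = false := by cases b <;> simp_all [cspOk]
      subst hb
      have h' : cspOk rest true = true := by simpa [cspOk] using h
      simp [List.foldl_cons, cspStep, bspec, ih _ _ h']
    · by_cases h2 : c = '}'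
      · subst h2
        have hb : b = true := by cases b <;> simp_all [cspOk]
        subst hb
        have h' : cspOk rest false = true := by simpa [cspOk] using h
        simp [List.foldl_cons, cspStep, bspec, ih _ _ h']
      · have h' : cspOk rest b = true := by simpa [cspOk, h1, h2] using h
        by_cases h3 : c = ',' ∧ b
        · obtain ⟨hc, hbb⟩ := h3
          subst hc
          rw [show b = true from hbb] at h' ⊢
          simp [List.foldl_cons, cspStep, bspec, h1, h2, ih _ _ h']
        · simp [List.foldl_cons, cspStep, bspec, h1, h2, h3, ih _ _ h']

-- scan ignores a brace-free prefix
theorem cspScan_skip (rest : List (Int × Char)) :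
    ∀ (l : List (Int × Char)), (∀ p ∈ l, cspIsBrace p.2 = false) →
    ∀ (pairs : List (Int × Int)) (lc : Option Char) (li : Int),
    cspScan (l ++ rest) pairs lc li = cspScan rest pairs lc li := by
  intro l
  induction l with
  | nil => intro _ pairs lc li; rfl
  | cons p t ih =>
    intro hl pairs lc li
    obtain ⟨idx, c⟩ := p
    have hc : cspIsBrace c = false := hl (idx, c) (by simp)
    have hnc : ¬ (c = '{' ∨ c = '}') := by
      simp [cspIsBrace] at hc; tauto
    rw [List.cons_append, cspScan_cons, if_pos hnc]
    exact ih (fun q hq => hl q (List.mem_cons_of_mem _ hq)) pairs lc li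

-- accumulated pairs factor out of the scan
theorem cspScan_acc :
    ∀ (l : List (Int × Char)) (p0 pairs : List (Int × Int)) (lc : Option Char) (li : Int),
    cspScan l (p0 ++ pairs) lc li =
      (cspScan l pairs lc li).map (fun r => (p0 ++ r.1, r.2)) := by
  intro l
  induction l with
  | nil => intro p0 pairs lc li; rfl
  | cons p t ih =>
    intro p0 pairs lc li
    obtain ⟨idx, c⟩ := p
    rw [cspScan_cons, cspScan_cons]
    split
    · exact ih p0 pairs lc li
    · split
      · split
        · rfl
        · exact ih p0 pairs (some '{') idx
      · split
        · rfl
        · split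
          · rfl
          · rw [List.append_assoc]
            exact ih p0 (pairs ++ [(li, idx)]) (some '}') idx

-- single-character replace is a map
theorem replace_go (fuel : Nat) :
    ∀ (cs acc : List Char), cs.length ≤ fuel →
    PySem.Chars.replace.go [','] [';'] fuel cs acc = acc.reverse ++ cs.map cspf := by
  induction fuel with
  | zero =>
    intro cs acc h
    have hcs : cs = [] := by cases cs <;> simp_all
    subst hcs
    simp [PySem.Chars.replace.go]
  | succ n ih =>
    intro cs acc h
    cases cs with
    | nil => simp [PySem.Chars.replace.go]
    | cons c t =>
      by_cases hc : c = ','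
      · subst hc
        have hpre : List.isPrefixOf [','] (',' :: t) = true := by
          simp [List.isPrefixOf]
        simp only [PySem.Chars.replace.go, hpre, if_true]
        rw [show (List.drop [','].length (',' :: t)) = t from rfl,
          show ([';'].reverse ++ acc : List Char) = ';' :: acc by simp]
        rw [ih t (';' :: acc) (by simpa using h)]
        simp [cspf]
      · simp only [PySem.Chars.replace.go]
        rw [if_neg (by simp [List.isPrefixOf]; exact fun h' => hc h'.symm)]
        rw [ih t (c :: acc) (by simpa using h)]
        simp [cspf, hc]

theorem replace_comma_semi (cs : List Char) :
    PySem.Chars.replace cs [','] [';'] = cs.map cspf := by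
  unfold PySem.Chars.replace
  simp only [List.isEmpty_cons, if_false, Bool.false_eq_true]
  rw [replace_go cs.length cs [] le_rfl]
  simp

-- A's slice-replace-slice step, in take/drop form
theorem cspApply_eq (cs : List Char) (a b : Nat) :
    cspApply cs ((a : Int), (b : Int)) =
      cs.take a ++ ((cs.drop a).take (b - a)).map cspf ++ cs.drop b := by
  simp [cspApply, PySem.Chars.slice_eq_listSlice, PySem.List.slice_to_natCast,
    PySem.List.slice_from_natCast, PySem.List.slice_natCast, replace_comma_semi]

theorem length_cspApply (cs : List Char) (a b : Nat) (hab : a ≤ b) (hb : b ≤ cs.length) :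
    (cspApply cs ((a : Int), (b : Int))).length = cs.length := by
  simp [cspApply_eq, List.length_append, List.length_take, List.length_drop]
  omega

-- applying a pair shifted past a fixed prefix leaves the prefix alone
theorem cspApply_shift (pre suf : List Char) (a b : Nat) (hab : a ≤ b) (hb : b ≤ suf.length) :
    cspApply (pre ++ suf) (((a + pre.length : Nat) : Int), ((b + pre.length : Nat) : Int)) =
      pre ++ cspApply suf ((a : Int), (b : Int)) := by
  rw [cspApply_eq, cspApply_eq,
    show a + pre.length = pre.length + a by omega,
    show b + pre.length = pre.length + b by omega,
    List.take_length_add_append, List.drop_length_add_append, List.drop_length_add_append,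
    show pre.length + b - (pre.length + a) = b - a by omega]
  simp [List.append_assoc]

theorem cspFold_shift (ps : List (Nat × Nat)) (pre suf : List Char)
    (hps : ∀ p ∈ ps, p.1 ≤ p.2 ∧ p.2 ≤ suf.length) :
    ps.foldl (fun l p => cspApply l (((p.1 + pre.length : Nat) : Int), ((p.2 + pre.length : Nat) : Int))) (pre ++ suf) =
      pre ++ ps.foldl (fun l p => cspApply l ((p.1 : Int), (p.2 : Int))) suf := by
  induction ps generalizing suf with
  | nil => simp
  | cons p ps ih =>
    have hp := hps p (by simp)
    simp only [List.foldl_cons]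
    rw [cspApply_shift pre suf p.1 p.2 hp.1 hp.2]
    exact ih (cspApply suf ((p.1 : Int), (p.2 : Int)))
      (fun q hq => by
        have := hps q (List.mem_cons_of_mem _ hq)
        rw [length_cspApply suf p.1 p.2 hp.1 hp.2]
        exact this)

-- the first collected pair rewrites exactly the first set pattern
theorem cspApply_head (u v w : List Char) :
    cspApply (u ++ '{' :: (v ++ '}' :: w))
        ((u.length : Int), (u.length : Int) + 1 + (v.length : Int)) =
      u ++ '{' :: (v.map cspf ++ '}' :: w) := by
  have hcast : ((u.length : Int), (u.length : Int) + 1 + (v.length : Int)) =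
      (((u.length : Nat) : Int), ((u.length + 1 + v.length : Nat) : Int)) := by
    simp
  have h3 : List.drop (u.length + 1 + v.length) (u ++ '{' :: (v ++ '}' :: w)) = '}' :: w := by
    rw [show u.length + 1 + v.length = (u ++ '{' :: v).length by
        simp only [List.length_append, List.length_cons]; omega,
      show u ++ '{' :: (v ++ '}' :: w) = (u ++ '{' :: v) ++ '}' :: w by simp,
      List.drop_left]
  rw [hcast, cspApply_eq, List.take_left, List.drop_left, h3,
    show u.length + 1 + v.length - u.length = v.length + 1 by omega,
    List.take_succ_cons, List.take_left]
  simp [cspf]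

-- bspec through a brace-free prefix, outside / inside a set
theorem bspec_nonbrace_false (u rest : List Char) (hu : ∀ c ∈ u, cspIsBrace c = false) :
    bspec (u ++ rest) false = u ++ bspec rest false := by
  induction u with
  | nil => rfl
  | cons c t ih =>
    have hc := hu c (by simp)
    have h1 : c ≠ '{' := by simp [cspIsBrace] at hc; tauto
    have h2 : c ≠ '}' := by simp [cspIsBrace] at hc; tauto
    simp [bspec, h1, h2, ih (fun d hd => hu d (List.mem_cons_of_mem _ hd))]

theorem bspec_nonbrace_true (v rest : List Char) (hv : ∀ c ∈ v, cspIsBrace c = false) :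
    bspec (v ++ rest) true = v.map cspf ++ bspec rest true := by
  induction v with
  | nil => rfl
  | cons c t ih =>
    have hc := hv c (by simp)
    have h1 : c ≠ '{' := by simp [cspIsBrace] at hc; tauto
    have h2 : c ≠ '}' := by simp [cspIsBrace] at hc; tauto
    simp [bspec, h1, h2, cspf, ih (fun d hd => hv d (List.mem_cons_of_mem _ hd))]

-- a successful run in state true owes exactly one '}' before returning to state false
theorem cspOk_true_decomp (cs : List Char) (h : cspOk cs true = true) :
    ∃ v w, cs = v ++ '}' :: w ∧ (∀ c ∈ v, cspIsBrace c = false) ∧ cspOk w false = true := by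
  induction cs with
  | nil => simp [cspOk] at h
  | cons c rest ih =>
    by_cases h1 : c = '{'
    · subst h1; simp [cspOk] at h
    · by_cases h2 : c = '}'
      · subst h2
        refine ⟨[], rest, by simp, by simp, ?_⟩
        simpa [cspOk] using h
      · have h' : cspOk rest true = true := by simpa [cspOk, h1, h2] using h
        obtain ⟨v, w, rfl, hv, hw⟩ := ih h'
        exact ⟨c :: v, w, by simp, by
          intro d hd
          rcases List.mem_cons.mp hd with rfl | hd
          · simp [cspIsBrace, h1, h2]
          · exact hv d hd, hw⟩

theorem cspOk_decomp (cs : List Char) (h : cspOk cs false = true) :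
    (∀ c ∈ cs, cspIsBrace c = false) ∨
    ∃ u v w, cs = u ++ '{' :: (v ++ '}' :: w) ∧ (∀ c ∈ u, cspIsBrace c = false) ∧
      (∀ c ∈ v, cspIsBrace c = false) ∧ cspOk w false = true := by
  induction cs with
  | nil => left; simp
  | cons c rest ih =>
    by_cases h1 : c = '{'
    · subst h1
      have h' : cspOk rest true = true := by simpa [cspOk] using h
      obtain ⟨v, w, rfl, hv, hw⟩ := cspOk_true_decomp rest h'
      exact Or.inr ⟨[], v, w, by simp, by simp, hv, hw⟩
    · by_cases h2 : c = '}'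
      · subst h2; simp [cspOk] at h
      · have h' : cspOk rest false = true := by simpa [cspOk, h1, h2] using h
        rcases ih h' with hbf | ⟨u, v, w, rfl, hu, hv, hw⟩
        · left
          intro d hd
          rcases List.mem_cons.mp hd with rfl | hd
          · simp [cspIsBrace, h1, h2]
          · exact hbf d hd
        · refine Or.inr ⟨c :: u, v, w, by simp, ?_, hv, hw⟩
          intro d hd
          rcases List.mem_cons.mp hd with rfl | hd
          · simp [cspIsBrace, h1, h2]
          · exact hu d hd

-- MAIN A-side lemma: the scan succeeds and folding the collected pairs yields bspec
theorem cspMain :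
    ∀ (n : Nat) (cs : List Char), cs.length ≤ n → cspOk cs false = true →
    ∀ (lc : Option Char), (lc = none ∨ lc = some '}') → ∀ (li s : Int),
    ∃ (pairs : List (Nat × Nat)) (lc' : Option Char),
      cspScan (PySem.List.enumerate cs s) [] lc li =
        .ok (pairs.map (fun p => ((p.1 : Int) + s, (p.2 : Int) + s)), lc') ∧
      lc' ≠ some '{' ∧
      (∀ p ∈ pairs, p.1 ≤ p.2 ∧ p.2 ≤ cs.length) ∧
      pairs.foldl (fun l p => cspApply l ((p.1 : Int), (p.2 : Int))) cs = bspec cs false := by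
  intro n
  induction n with
  | zero =>
    intro cs hn h lc hlc li s
    have hcs : cs = [] := by cases cs <;> simp_all
    subst hcs
    refine ⟨[], lc, by simp [PySem.List.enumerate_nil, cspScan], ?_, by simp, by simp [bspec]⟩
    rcases hlc with rfl | rfl <;> simp
  | succ n ih =>
    intro cs hn h lc hlc li s
    rcases cspOk_decomp cs h with hbf | ⟨u, v, w, rfl, hu, hv, hw⟩
    · -- brace-free: the scan skips everything, no pairs
      refine ⟨[], lc, ?_, ?_, by simp, ?_⟩
      · have hmem : ∀ p ∈ PySem.List.enumerate cs s, cspIsBrace p.2 = false := by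
          intro p hp
          rcases (PySem.List.mem_enumerate_iff _ _ _).mp hp with ⟨k, hk, rfl⟩
          exact hbf _ (List.getElem_mem hk)
        have := cspScan_skip [] (PySem.List.enumerate cs s) hmem [] lc li
        simpa using this
      · rcases hlc with rfl | rfl <;> simp
      · have := bspec_nonbrace_false cs [] hbf
        simp only [List.append_nil, bspec] at this
        simpa using this.symm
    · -- cs = u ++ '{' :: (v ++ '}' :: w)
      have hnw : w.length ≤ n := by
        simp only [List.length_append, List.length_cons] at hn; omega
      obtain ⟨pw, lcw, hscanw, hlcw, hbw, hfw⟩ :=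
        ih w hnw hw (some '}') (Or.inr rfl) (s + ↑u.length + 1 + ↑v.length)
          (s + ↑u.length + 1 + ↑v.length + 1)
      have hmem_u : ∀ p ∈ PySem.List.enumerate u s, cspIsBrace p.2 = false := by
        intro p hp
        rcases (PySem.List.mem_enumerate_iff _ _ _).mp hp with ⟨k, hk, rfl⟩
        exact hu _ (List.getElem_mem hk)
      have hmem_v : ∀ p ∈ PySem.List.enumerate v (s + ↑u.length + 1), cspIsBrace p.2 = false := by
        intro p hp
        rcases (PySem.List.mem_enumerate_iff _ _ _).mp hp with ⟨k, hk, rfl⟩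
        exact hv _ (List.getElem_mem hk)
      have henum : PySem.List.enumerate (u ++ '{' :: (v ++ '}' :: w)) s =
          PySem.List.enumerate u s ++ (s + ↑u.length, '{') ::
            (PySem.List.enumerate v (s + ↑u.length + 1) ++
              (s + ↑u.length + 1 + ↑v.length, '}') ::
                PySem.List.enumerate w (s + ↑u.length + 1 + ↑v.length + 1)) := by
        rw [PySem.List.enumerate_append, PySem.List.enumerate_cons,
          PySem.List.enumerate_append, PySem.List.enumerate_cons]
      refine ⟨(u.length, u.length + 1 + v.length) ::
          pw.map (fun p => (p.1 + (u.length + v.length + 2), p.2 + (u.length + v.length + 2))),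
        lcw, ?_, hlcw, ?_, ?_⟩
      · have hstep : ∀ X, cspScan ((s + ↑u.length, '{') :: X) [] lc li =
            cspScan X [] (some '{') (s + ↑u.length) := by
          intro X
          rw [cspScan_cons, if_neg (by simp), if_pos rfl,
            if_neg (by rcases hlc with rfl | rfl <;> simp)]
        rw [henum, cspScan_skip _ _ hmem_u, hstep, cspScan_skip _ _ hmem_v, cspScan_cons,
          if_neg (by simp), if_neg (by simp), if_neg (by simp), if_neg (by simp),
          List.nil_append]
        have hacc := cspScan_acc (PySem.List.enumerate w (s + ↑u.length + 1 + ↑v.length + 1))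
          [(s + ↑u.length, s + ↑u.length + 1 + ↑v.length)] [] (some '}')
          (s + ↑u.length + 1 + ↑v.length)
        simp only [List.append_nil] at hacc
        rw [hacc, hscanw]
        dsimp only [Except.map]
        congr 1
        simp only [List.map_cons, List.map_map, List.singleton_append, Prod.mk.injEq, and_true]
        refine List.cons_eq_cons.mpr ⟨?_, ?_⟩
        · rw [Prod.mk.injEq]
          constructor <;> push_cast <;> ring
        · refine List.map_congr_left ?_
          intro q hq
          simp only [Function.comp_apply]
          rw [Prod.mk.injEq]
          constructor <;> push_cast <;> ring
      · intro p hp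
        have hlen2 : (u ++ '{' :: (v ++ '}' :: w)).length = u.length + v.length + 2 + w.length := by
          simp only [List.length_append, List.length_cons]; omega
        rcases List.mem_cons.mp hp with rfl | hp
        · dsimp only
          rw [hlen2]
          exact ⟨by omega, by omega⟩
        · rcases List.mem_map.mp hp with ⟨q, hq, rfl⟩
          obtain ⟨h1, h2⟩ := hbw q hq
          dsimp only
          rw [hlen2]
          exact ⟨by omega, by omega⟩
      · simp only [List.foldl_cons]
        have happ : cspApply (u ++ '{' :: (v ++ '}' :: w))
            (((u.length : Nat) : Int), ((u.length + 1 + v.length : Nat) : Int)) =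
            u ++ '{' :: (v.map cspf ++ '}' :: w) := by
          have h0 := cspApply_head u v w
          rw [show ((u.length : Int), (u.length : Int) + 1 + (v.length : Int)) =
              (((u.length : Nat) : Int), ((u.length + 1 + v.length : Nat) : Int)) by simp] at h0
          exact h0
        rw [happ, List.foldl_map]
        have hpre : u ++ '{' :: (v.map cspf ++ '}' :: w) =
            (u ++ '{' :: (v.map cspf ++ ['}'])) ++ w := by simp
        have hm : u.length + v.length + 2 = (u ++ '{' :: (v.map cspf ++ ['}'])).length := by
          simp only [List.length_append, List.length_cons, List.length_map,
            List.length_nil]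
          omega
        rw [hpre]
        simp only [hm]
        rw [cspFold_shift pw (u ++ '{' :: (v.map cspf ++ ['}'])) w hbw, hfw]
        rw [bspec_nonbrace_false u _ hu,
          show bspec ('{' :: (v ++ '}' :: w)) false = '{' :: bspec (v ++ '}' :: w) true by
            simp [bspec],
          bspec_nonbrace_true v _ hv,
          show bspec ('}' :: w) true = '}' :: bspec w false by simp [bspec]]
        simp

-- ===== VERDICT (by name: the statement is the Claim_ definition above) =====
theorem convert_set_patterns_spec : Claim_equal_convert_set_patterns := by
  unfold Claim_equal_convert_set_patterns
  intro target _ hpre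
  unfold Pre_convert_set_patterns at hpre
  have hok : cspOk target.toList false = true := by
    rw [cspOk_eq_balanced]; simpa using hpre
  unfold Spec_convert_set_patterns convert_set_patterns convert_set_patterns_alt
  obtain ⟨pairs, lc', hscan, hlc', hb, hfold⟩ :=
    cspMain target.toList.length target.toList le_rfl hok none (Or.inl rfl) 0 0
  rw [bfold _ [] false hok, hscan]
  dsimp only
  rw [if_neg hlc']
  simp only [List.nil_append, Bool.false_eq_true, if_false]
  congr 1
  have : (pairs.map (fun p => ((p.1 : Int) + 0, (p.2 : Int) + 0))) =
      pairs.map (fun p => ((p.1 : Int), (p.2 : Int))) := by simp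
  rw [this, List.foldl_map]
  exact hfold
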